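-- pv_equiv track=rewrite | github.com/Philogy/riscv-emulator-challenge | key_analysis.py | find_group_index
-- ===== SOURCE A (Python) =====
-- import bisect
--
-- def find_group_index(groups, x, PAGE):
--     """
--     Binary search to find appropriate group index.
--     Returns index of group where abs(start - x) < PAGE or -1 if not found.
--     """
--     if not groups:
--         return -1
--
--     # Get all starts for binary search
--     starts = [g[0] for g in groups]
--
--     # Find closest position where we might insert x
--     pos = bisect.bisect_left(starts, x)
--
--     # Check the potential positions
--     candidates = []
--
--     # Check position at pos (if it exists)
--     if pos < len(groups):
--         if abs(groups[pos][0] - x) < PAGE: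
--             candidates.append(pos)
--
--     # Check position before pos (if it exists)
--     if pos > 0:
--         if abs(groups[pos-1][0] - x) < PAGE:
--             candidates.append(pos-1)
--
--     # Return the first matching group (prioritizing earlier groups)
--     return min(candidates) if candidates else -1
-- ===== SOURCE B (Python) =====
-- def find_group_index(groups, x, PAGE):
--     # Divide-and-conquer on shrinking sublists (no starts list, no lo/hi index
--     # arithmetic): insertion_point recursively halves the sublist itself and
--     # accumulates the offset; then an early-return chain checks the earlier
--     # neighbour first, so no candidates list / min is needed.
--     def insertion_point(gs):
--         if not gs:
--             return 0
--         mid = len(gs) // 2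
--         if gs[mid][0] < x:
--             return mid + 1 + insertion_point(gs[mid + 1:])
--         return insertion_point(gs[:mid])
--
--     pos = insertion_point(groups)
--     if pos > 0 and abs(groups[pos - 1][0] - x) < PAGE:
--         return pos - 1
--     if pos < len(groups) and abs(groups[pos][0] - x) < PAGE:
--         return pos
--     return -1
-- ===== Notes on version B (the rewrite author's own statement) =====
-- stated objective: alternative
-- what changed: B replaces key-list extraction + library bisect + candidates/min with a recursive divide-and-conquer that halves the sublist itself (no starts list, no lo/hi indices), accumulating the offset, followed by an early-return neighbour chain; it probes the same group starts, so the insertion point (and hence the result) is identical even on unsorted input.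
import Mathlib
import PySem

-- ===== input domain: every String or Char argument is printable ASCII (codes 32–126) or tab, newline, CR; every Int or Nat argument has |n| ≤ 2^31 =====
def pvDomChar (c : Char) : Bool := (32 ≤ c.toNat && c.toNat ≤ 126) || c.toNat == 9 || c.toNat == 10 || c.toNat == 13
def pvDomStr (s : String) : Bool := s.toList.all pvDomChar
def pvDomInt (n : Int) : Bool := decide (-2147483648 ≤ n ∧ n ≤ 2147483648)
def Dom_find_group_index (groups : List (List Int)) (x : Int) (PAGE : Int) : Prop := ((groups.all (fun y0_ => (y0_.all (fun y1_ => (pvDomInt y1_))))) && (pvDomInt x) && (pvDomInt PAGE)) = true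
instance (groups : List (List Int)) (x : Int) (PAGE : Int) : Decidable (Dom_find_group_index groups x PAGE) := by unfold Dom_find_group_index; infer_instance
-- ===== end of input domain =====

-- B replaces starts-list + library bisect + candidates/min with a recursive
-- divide-and-conquer that halves the sublist itself, plus an early-return
-- neighbour chain; it probes the same starts, so the result is identical.

-- ===== PORT A =====
-- bisect.bisect_left(starts, x): lo=0, hi=len; while lo<hi: mid=(lo+hi)//2; a[mid]<x → lo=mid+1 else hi=mid
-- (the while loop as structural recursion on a fuel ≥ hi-lo, a pure totality guard)
def pvBisectLeft (a : List Int) (x : Int) : Nat → Nat → Nat → Nat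
  | 0, lo, _ => lo
  | fuel + 1, lo, hi =>
    if lo < hi then
      let mid := (lo + hi) / 2
      if a.getD mid 0 < x then pvBisectLeft a x fuel (mid + 1) hi
      else pvBisectLeft a x fuel lo mid
    else lo

def find_group_index (groups : List (List Int)) (x : Int) (PAGE : Int) : Int :=
  if groups = [] then -1
  else
    let starts := groups.map (fun g => PySem.List.pyGetD g 0 0)
    let pos := pvBisectLeft starts x starts.length 0 starts.length
    let candidates : List Int :=
      (if pos < groups.length ∧ |PySem.List.pyGetD (PySem.List.pyGetD groups (pos : Int) []) 0 0 - x| < PAGE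
        then [(pos : Int)] else [])
      ++
      (if 0 < pos ∧ |PySem.List.pyGetD (PySem.List.pyGetD groups ((pos : Int) - 1) []) 0 0 - x| < PAGE
        then [(pos : Int) - 1] else [])
    match PySem.List.min? candidates id with
    | some m => m
    | none => -1

-- ===== PORT B =====
-- insertion_point(gs): divide-and-conquer on the sublist itself.  gs[mid+1:] and
-- gs[:mid] with 0 ≤ mid < len gs are exactly List.drop (mid+1) / List.take mid;
-- structural recursion on a fuel ≥ gs.length, a pure totality guard.
def pvInsPoint (x : Int) : Nat → List (List Int) → Nat
  | 0, _ => 0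
  | fuel + 1, gs =>
    if gs = [] then 0
    else
      let mid := gs.length / 2
      if PySem.List.pyGetD (PySem.List.pyGetD gs (mid : Int) []) 0 0 < x then
        mid + 1 + pvInsPoint x fuel (gs.drop (mid + 1))
      else pvInsPoint x fuel (gs.take mid)

def find_group_index_alt (groups : List (List Int)) (x : Int) (PAGE : Int) : Int :=
  let pos := pvInsPoint x groups.length groups
  if 0 < pos ∧ |PySem.List.pyGetD (PySem.List.pyGetD groups ((pos : Int) - 1) []) 0 0 - x| < PAGE then
    (pos : Int) - 1
  else if pos < groups.length ∧ |PySem.List.pyGetD (PySem.List.pyGetD groups (pos : Int) []) 0 0 - x| < PAGE then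
    (pos : Int)
  else -1

-- ===== PRECONDITION & SPEC =====
-- Pre_ excludes inputs containing an empty inner group: A raises IndexError on g[0] there.
def Pre_find_group_index (groups : List (List Int)) (x : Int) (PAGE : Int) : Prop :=
  ∀ g ∈ groups, g ≠ []
instance (groups : List (List Int)) (x : Int) (PAGE : Int) : Decidable (Pre_find_group_index groups x PAGE) := by unfold Pre_find_group_index; infer_instance

def pvWitness_find_group_index : List (List Int) × Int × Int := ([[0], [10], [20]], 12, 5)

def Spec_find_group_index (groups : List (List Int)) (x : Int) (PAGE : Int) (out : Int) : Prop := out = find_group_index_alt groups x PAGE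
instance (groups : List (List Int)) (x : Int) (PAGE : Int) (out : Int) : Decidable (Spec_find_group_index groups x PAGE out) := by unfold Spec_find_group_index; infer_instance

-- ===== CLAIM (what is proved, stated in full; the proofs are below) =====
def Claim_equal_find_group_index : Prop := ∀ (groups : List (List Int)) (x : Int) (PAGE : Int), Dom_find_group_index groups x PAGE → Pre_find_group_index groups x PAGE → Spec_find_group_index groups x PAGE (find_group_index groups x PAGE)

-- ===== LEMMAS AND PROOFS =====

-- A's bisect over the mapped starts list, on the window [lo, hi), equals lo plus
-- B's divide-and-conquer insertion point on the corresponding sublist: both probe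
-- the same group starts in the same order (any sufficient fuels).
lemma bisect_eq_insPoint (groups : List (List Int)) (x : Int) :
    ∀ n fa fb lo hi, hi - lo = n → n ≤ fa → n ≤ fb → hi ≤ groups.length →
      pvBisectLeft (groups.map (fun g => PySem.List.pyGetD g 0 0)) x fa lo hi
        = lo + pvInsPoint x fb ((groups.drop lo).take (hi - lo)) := by
  intro n
  induction n using Nat.strong_induction_on with
  | _ n ih =>
    intro fa fb lo hi hn hfa hfb hhi
    by_cases hlt : lo < hi
    · obtain ⟨a, rfl⟩ : ∃ a, fa = a + 1 := ⟨fa - 1, by omega⟩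
      obtain ⟨b, rfl⟩ : ∃ b, fb = b + 1 := ⟨fb - 1, by omega⟩
      have hsublen : ((groups.drop lo).take (hi - lo)).length = hi - lo := by
        simp only [List.length_take, List.length_drop]; omega
      have hsubne : (groups.drop lo).take (hi - lo) ≠ [] := by
        intro h; rw [h] at hsublen; simp at hsublen; omega
      have hmid : (lo + hi) / 2 = lo + (hi - lo) / 2 := by omega
      have hmlt : lo + (hi - lo) / 2 < hi := by omega
      have hprobe : (groups.map (fun g => PySem.List.pyGetD g 0 0)).getD ((lo + hi) / 2) 0
          = PySem.List.pyGetD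
              (PySem.List.pyGetD ((groups.drop lo).take (hi - lo))
                ((((groups.drop lo).take (hi - lo)).length / 2 : Nat) : Int) []) 0 0 := by
        rw [hsublen, PySem.List.pyGetD_natCast, hmid]
        have h1 : lo + (hi - lo) / 2 < (groups.map (fun g => PySem.List.pyGetD g 0 0)).length := by
          simp only [List.length_map]; omega
        have h2 : (hi - lo) / 2 < ((groups.drop lo).take (hi - lo)).length := by omega
        rw [List.getD_eq_getElem _ _ h1, List.getD_eq_getElem _ _ h2]
        simp only [List.getElem_map, List.getElem_take, List.getElem_drop]
      rw [pvBisectLeft, pvInsPoint, if_pos hlt, if_neg hsubne]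
      simp only [hsublen] at hprobe
      simp only [hsublen, ← hprobe]
      split_ifs with hc
      · -- left probe smaller: recurse on the right half
        have hdrop : ((groups.drop lo).take (hi - lo)).drop ((hi - lo) / 2 + 1)
            = (groups.drop ((lo + hi) / 2 + 1)).take (hi - ((lo + hi) / 2 + 1)) := by
          rw [List.drop_take, List.drop_drop]
          congr 1
          · omega
          · congr 1
            omega
        have hrec := ih (hi - ((lo + hi) / 2 + 1)) (by omega) a b ((lo + hi) / 2 + 1) hi rfl
          (by omega) (by omega) hhi
        rw [hrec, hdrop]
        omega
      · -- recurse on the left half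
        have htake : ((groups.drop lo).take (hi - lo)).take ((hi - lo) / 2)
            = (groups.drop lo).take ((lo + hi) / 2 - lo) := by
          rw [List.take_take]
          congr 1; omega
        have hrec := ih ((lo + hi) / 2 - lo) (by omega) a b lo ((lo + hi) / 2) rfl
          (by omega) (by omega) (by omega)
        rw [hrec, htake]
    · have h0 : hi - lo = 0 := by omega
      rw [h0]
      cases fa <;> cases fb <;>
        simp [pvBisectLeft, pvInsPoint, if_neg hlt]

lemma tail_eq (P Q : Prop) [Decidable P] [Decidable Q] (p q : Int) (hqp : q < p) :
    (match PySem.List.min? ((if P then [p] else []) ++ (if Q then [q] else [])) id with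
      | some m => m
      | none => -1) = if Q then q else if P then p else (-1 : Int) := by
  split_ifs with h1 h2 <;> simp_all [PySem.List.min?]

-- ===== VERDICT (by name: the statement is the Claim_ definition above) =====
theorem find_group_index_spec : Claim_equal_find_group_index := by
  intro groups x PAGE _ _
  unfold Spec_find_group_index
  by_cases hnil : groups = []
  · subst hnil
    simp [find_group_index, find_group_index_alt, pvInsPoint]
  · have hpos : pvBisectLeft (groups.map (fun g => PySem.List.pyGetD g 0 0)) x
        groups.length 0 groups.length = pvInsPoint x groups.length groups := by
      have := bisect_eq_insPoint groups x groups.length groups.length groups.length 0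
        groups.length rfl (by omega) (by omega) le_rfl
      simpa using this
    simp only [find_group_index, find_group_index_alt, if_neg hnil, List.length_map, hpos]
    rw [tail_eq _ _ _ _ (by omega)]
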